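-- pv_equiv track=rewrite | github.com/rodolfo0259/NappAcademy2-2021 | sprint2/sprint2.py | contar_ocorrencias_cartao_credito_por_ano
-- ===== SOURCE A (Python) =====
-- def contar_ocorrencias_cartao_credito_por_ano(lista)->dict:
--     '''
--     Conta todas as ocorrencias de fraude de cartao para cada ano
--
--     Args:
--         lista: lista de tuples (obrigatorio)
--
--     Return:
--         dict: dicionario contendo o ano e a quatidade de ocorrencias para cada
--     '''
--     count = dict()
--     for item in lista:
--         ano = item[-1].split('/')[1]
--         if ano in count:
--             count[ano] += 1
--         else:
--             count[ano] = 1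
--
--     return count
-- ===== SOURCE B (Python) =====
-- def contar_ocorrencias_cartao_credito_por_ano(lista) -> dict:
--     anos = [item[-1].split('/')[1] for item in lista]
--     return {ano: anos.count(ano) for ano in dict.fromkeys(anos)}
-- ===== Notes on version B (the rewrite author's own statement) =====
-- stated objective: idiomatic
-- what changed: Replaces the incremental if-in-dict/else-insert accumulator with a two-pass pipeline: extract all year keys, then build the result by a dict comprehension over dict.fromkeys (ordered dedup) using list.count per distinct year.
import Mathlib
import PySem

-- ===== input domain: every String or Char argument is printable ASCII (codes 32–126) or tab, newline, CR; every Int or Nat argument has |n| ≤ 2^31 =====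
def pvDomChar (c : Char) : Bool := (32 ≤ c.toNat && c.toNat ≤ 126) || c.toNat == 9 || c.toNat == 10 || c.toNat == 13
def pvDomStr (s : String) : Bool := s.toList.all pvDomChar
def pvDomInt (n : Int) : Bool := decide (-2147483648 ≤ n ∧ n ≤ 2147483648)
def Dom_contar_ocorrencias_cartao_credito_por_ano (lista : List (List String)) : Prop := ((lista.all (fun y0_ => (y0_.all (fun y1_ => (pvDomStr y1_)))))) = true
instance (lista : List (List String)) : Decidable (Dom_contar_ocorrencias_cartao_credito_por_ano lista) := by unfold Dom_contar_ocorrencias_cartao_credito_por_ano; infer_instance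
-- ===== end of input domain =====

-- B replaces the incremental if-in-dict accumulator by a two-pass pipeline (extract all keys, then count per distinct key); same return value, no speed claim.

-- ===== PORT A =====
-- ano = item[-1].split('/')[1]; none exactly where Python raises IndexError (excluded by Pre_; the ports skip such items)
def pvAno? (item : List String) : Option String :=
  match PySem.List.pyGet? item (-1) with
  | none => none
  | some ult =>
      match PySem.Str.split? ult "/" with
      | none => none
      | some partes => PySem.List.pyGet? partes 1

def contar_ocorrencias_cartao_credito_por_ano (lista : List (List String)) : List (String × Int) :=
  (lista.foldl (fun count item =>
      match pvAno? item with
      | some ano =>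
          if count.contains ano then count.modify ano 0 (fun v => v + 1)
          else count.insert ano 1
      | none => count)
    (PySem.Dict.empty : PySem.Dict String Int)).items

-- ===== PORT B =====
def contar_ocorrencias_cartao_credito_por_ano_alt (lista : List (List String)) : List (String × Int) :=
  let anos := lista.filterMap pvAno?
  (PySem.List.dedup anos).map (fun ano => (ano, (PySem.List.count anos ano : Int)))

-- ===== PRECONDITION & SPEC =====
-- Pre_ excludes exactly the inputs where Python A raises IndexError: an empty tuple (item[-1]) or a last field with no '/' (split('/')[1]).
def Pre_contar_ocorrencias_cartao_credito_por_ano (lista : List (List String)) : Prop :=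
  ∀ item ∈ lista, item ≠ [] ∧ 2 ≤ ((PySem.Str.split? (item.getLast!) "/").getD []).length
instance (lista : List (List String)) : Decidable (Pre_contar_ocorrencias_cartao_credito_por_ano lista) := by unfold Pre_contar_ocorrencias_cartao_credito_por_ano; infer_instance
def pvWitness_contar_ocorrencias_cartao_credito_por_ano : List (List String) := [["x", "01/2020"], ["y", "02/2020"], ["z", "03/2019"]]

def Spec_contar_ocorrencias_cartao_credito_por_ano (lista : List (List String)) (out : List (String × Int)) : Prop := out = contar_ocorrencias_cartao_credito_por_ano_alt lista
instance (lista : List (List String)) (out : List (String × Int)) : Decidable (Spec_contar_ocorrencias_cartao_credito_por_ano lista out) := by unfold Spec_contar_ocorrencias_cartao_credito_por_ano; infer_instance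

-- ===== CLAIM (what is proved, stated in full; the proofs are below) =====
def Claim_equal_contar_ocorrencias_cartao_credito_por_ano : Prop := ∀ (lista : List (List String)), Dom_contar_ocorrencias_cartao_credito_por_ano lista → Pre_contar_ocorrencias_cartao_credito_por_ano lista → Spec_contar_ocorrencias_cartao_credito_por_ano lista (contar_ocorrencias_cartao_credito_por_ano lista)

-- ===== LEMMAS AND PROOFS =====
-- A's branched loop step ('if ano in count: count[ano] += 1 else: count[ano] = 1') IS the Counter step.
theorem pvStep_eq (d : PySem.Dict String Int) (x : String) :
    (if d.contains x then d.modify x 0 (fun v => v + 1) else d.insert x 1) = d.modify x 0 (fun v => v + 1) := by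
  by_cases h : d.contains x = true
  · simp [h]
  · simp only [h, Bool.false_eq_true, if_false]
    cases d with
    | mk l =>
      induction l with
      | nil => rfl
      | cons p t ih =>
        simp_all [PySem.Dict.insert, PySem.Dict.modify, PySem.Dict.contains]
        rw [PySem.Dict.getD_of_not_contains]
        simp [PySem.Dict.contains]
        exact ⟨h.1, fun a b hab hax => h.2 b (hax ▸ hab)⟩

-- A's loop over lista, which skips items whose key extraction yields none, is the same loop over the extracted keys.
theorem pvFoldl_skip (l : List (List String)) (d : PySem.Dict String Int) :
    l.foldl (fun count item =>
      match pvAno? item with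
      | some ano =>
          if count.contains ano then count.modify ano 0 (fun v => v + 1)
          else count.insert ano 1
      | none => count) d
  = (l.filterMap pvAno?).foldl (fun count ano =>
          if count.contains ano then count.modify ano 0 (fun v => v + 1)
          else count.insert ano 1) d := by
  induction l generalizing d with
  | nil => rfl
  | cons hd tl ih =>
    cases hno : pvAno? hd <;> simp [hno, ih]

-- ===== VERDICT (by name: the statement is the Claim_ definition above) =====
theorem contar_ocorrencias_cartao_credito_por_ano_spec : Claim_equal_contar_ocorrencias_cartao_credito_por_ano := by
  intro lista _ _
  unfold Spec_contar_ocorrencias_cartao_credito_por_ano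
  unfold contar_ocorrencias_cartao_credito_por_ano contar_ocorrencias_cartao_credito_por_ano_alt
  rw [pvFoldl_skip]
  have hcongr := PySem.List.foldl_congr_mem
    (l := lista.filterMap pvAno?) (init := (PySem.Dict.empty : PySem.Dict String Int))
    (f := fun count ano => if count.contains ano then count.modify ano 0 (fun v => v + 1) else count.insert ano 1)
    (g := fun d x => d.modify x 0 (fun v => v + 1))
    (fun acc x _ => pvStep_eq acc x)
  rw [hcongr, ← PySem.Dict.counter_eq_foldl, PySem.Dict.items_counter]
  simp [PySem.List.count]
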